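-- pv_equiv track=rewrite | github.com/74nadathabet/exploreco-course-recommender | main.py | calculate_wrong_questions
-- ===== SOURCE A (Python) =====
-- def calculate_wrong_questions(score, max_topic_score=70):
--     missing = max_topic_score - score
--     easy = medium = hard = 0
--     while missing >= 50 and hard < 2:
--         hard += 1; missing -= 50
--     while missing >= 20 and medium < 2:
--         medium += 1; missing -= 20
--     while missing >= 5 and easy < 2:
--         easy += 1; missing -= 5
--     return easy, medium, hard
-- ===== SOURCE B (Python) =====
-- def calculate_wrong_questions(score, max_topic_score=70):
--     missing = max_topic_score - score
--     hard = min(2, max(0, missing // 50))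
--     missing -= 50 * hard
--     medium = min(2, max(0, missing // 20))
--     missing -= 20 * medium
--     easy = min(2, max(0, missing // 5))
--     return easy, medium, hard
-- ===== Notes on version B (the rewrite author's own statement) =====
-- stated objective: simpler
-- what changed: Replaced the three capped while-loops with closed-form arithmetic: each count is min(2, max(0, remaining // step)) and the remainder is updated by subtraction, no loops at all.
import Mathlib
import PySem

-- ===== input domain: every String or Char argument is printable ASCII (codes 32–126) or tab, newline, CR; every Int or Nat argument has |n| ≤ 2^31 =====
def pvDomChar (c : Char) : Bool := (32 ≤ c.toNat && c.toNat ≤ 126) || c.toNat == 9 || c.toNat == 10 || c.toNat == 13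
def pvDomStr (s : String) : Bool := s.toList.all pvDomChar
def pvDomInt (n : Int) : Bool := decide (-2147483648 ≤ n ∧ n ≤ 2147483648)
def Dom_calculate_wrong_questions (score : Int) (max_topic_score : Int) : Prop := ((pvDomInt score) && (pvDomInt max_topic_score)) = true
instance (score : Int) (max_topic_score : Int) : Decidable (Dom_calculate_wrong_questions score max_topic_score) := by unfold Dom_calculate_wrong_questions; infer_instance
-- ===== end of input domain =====

-- B replaces the three capped while-loops with closed-form arithmetic (no loops); objective: simpler.

-- ===== PORT A =====
-- each while-loop of A: guard `missing >= step ∧ count < 2`, body `count += 1; missing -= step`;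
-- terminates because (2 - count) decreases.
def pvLoopA (step : Int) (missing : Int) (count : Int) : Int × Int :=
  if missing ≥ step ∧ count < 2 then pvLoopA step (missing - step) (count + 1)
  else (missing, count)
termination_by (2 - count).toNat
decreasing_by omega

def calculate_wrong_questions (score : Int) (max_topic_score : Int) : Int × Int × Int :=
  let missing := max_topic_score - score
  let r1 := pvLoopA 50 missing 0      -- (missing, hard) after the first while
  let r2 := pvLoopA 20 r1.1 0         -- (missing, medium) after the second while
  let r3 := pvLoopA 5 r2.1 0          -- (missing, easy) after the third while
  (r3.2, r2.2, r1.2)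

-- ===== PORT B =====
def calculate_wrong_questions_alt (score : Int) (max_topic_score : Int) : Int × Int × Int :=
  let missing := max_topic_score - score
  let hard := min 2 (max 0 (PySem.Int.floordiv missing 50))
  let missing := missing - 50 * hard
  let medium := min 2 (max 0 (PySem.Int.floordiv missing 20))
  let missing := missing - 20 * medium
  let easy := min 2 (max 0 (PySem.Int.floordiv missing 5))
  (easy, medium, hard)

-- ===== PRECONDITION & SPEC =====
def Spec_calculate_wrong_questions (score : Int) (max_topic_score : Int) (out : Int × Int × Int) : Prop := out = calculate_wrong_questions_alt score max_topic_score
instance (score : Int) (max_topic_score : Int) (out : Int × Int × Int) : Decidable (Spec_calculate_wrong_questions score max_topic_score out) := by unfold Spec_calculate_wrong_questions; infer_instance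

-- ===== CLAIM (what is proved, stated in full; the proofs are below) =====
def Claim_equal_calculate_wrong_questions : Prop := ∀ (score : Int) (max_topic_score : Int), Dom_calculate_wrong_questions score max_topic_score → Spec_calculate_wrong_questions score max_topic_score (calculate_wrong_questions score max_topic_score)

-- ===== LEMMAS AND PROOFS =====

-- unrolled characterisation of A's loop started at count = 0 (it runs at most twice)
theorem pvLoopA_zero (step m : Int) (hs : 0 < step) :
    pvLoopA step m 0 =
      if m ≥ 2 * step then (m - 2 * step, 2)
      else if m ≥ step then (m - step, 1)
      else (m, 0) := by
  rw [pvLoopA, pvLoopA, pvLoopA]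
  split_ifs with h1 h2 h3 h4 h5 <;> simp_all <;> omega

-- the closed form equals the loop's result, for a positive step
theorem pvLoopA_closed (step m : Int) (hs : 0 < step) :
    pvLoopA step m 0 =
      (m - step * min 2 (max 0 (PySem.Int.floordiv m step)),
       min 2 (max 0 (PySem.Int.floordiv m step))) := by
  rw [pvLoopA_zero step m hs]
  have hd : step * (PySem.Int.floordiv m step) + PySem.Int.mod m step = m := by
    simpa [PySem.Int.floordiv, PySem.Int.mod] using Int.mul_fdiv_add_fmod m step
  have hr0 : 0 ≤ PySem.Int.mod m step := by
    simp only [PySem.Int.mod]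
    rw [Int.fmod_eq_emod]; simp [hs.le]; exact Int.emod_nonneg m (by omega)
  have hr1 : PySem.Int.mod m step < step := by
    simpa [PySem.Int.mod] using Int.fmod_lt_of_pos m hs
  set q := PySem.Int.floordiv m step with hq
  split_ifs with h1 h2
  · have h2q : 2 ≤ q := by nlinarith
    have : min 2 (max 0 q) = 2 := by omega
    rw [this]; congr 1 <;> ring
  · have h1q : q = 1 := by nlinarith [sq_nonneg (q-1)]
    have : min 2 (max 0 q) = 1 := by omega
    rw [this]; congr 1 <;> ring
  · have h0q : q ≤ 0 := by nlinarith
    have : min 2 (max 0 q) = 0 := by omega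
    rw [this]; congr 1 <;> ring

-- ===== VERDICT (by name: the statement is the Claim_ definition above) =====
theorem calculate_wrong_questions_spec : Claim_equal_calculate_wrong_questions := by
  intro score max_topic_score _
  unfold Spec_calculate_wrong_questions calculate_wrong_questions calculate_wrong_questions_alt
  simp only [pvLoopA_closed 50 _ (by norm_num), pvLoopA_closed 20 _ (by norm_num),
    pvLoopA_closed 5 _ (by norm_num)]
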